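-- pv_equiv track=rewrite | github.com/jesopo/irctoolkit | freenode/weechat/maskmatch2.py | _match_one
-- ===== SOURCE A (Python) =====
-- def _glob_match(pattern, s):
--     i, j = 0, 0
--
--     i_backup = -1
--     j_backup = -1
--     while j < len(s):
--         p = (pattern[i:] or [None])[0]
--
--         if p == "*":
--             i += 1
--             i_backup = i
--             j_backup = j
--
--         elif p in ["?", s[j]]:
--             i += 1
--             j += 1
--
--         else:
--             if i_backup == -1:
--                 return False
--             else:
--                 j_backup += 1
--                 j = j_backup
--                 i = i_backup
--
--     return i == len(pattern)
--
-- def _match_one(extban, mask, users_masks):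
--     affected = []
--     for nickname in sorted(users_masks.keys()):
--         user_masks = users_masks[nickname]
--         for user_extban, user_mask in user_masks:
--             if ((not extban or user_extban) and
--                     _glob_match(mask, user_mask)):
--                 affected.append(nickname)
--                 break
--     return affected
-- ===== SOURCE B (Python) =====
-- def _match_one(extban, mask, users_masks):
--     # recursive descent wildcard matcher instead of A's iterative backtracking loop
--     def match(s):
--         def f(i, j):
--             if j == len(s):
--                 return i == len(mask)
--             if i == len(mask):
--                 return False
--             c = mask[i]
--             if c == "*":
--                 return i + 1 == len(mask) or f(i + 1, j) or f(i, j + 1)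
--             return (c == "?" or c == s[j]) and f(i + 1, j + 1)
--         return f(0, 0)
--
--     return [nick for nick in sorted(users_masks)
--             if any((not extban or ue) and match(um)
--                    for ue, um in users_masks[nick])]
-- ===== Notes on version B (the rewrite author's own statement) =====
-- stated objective: alternative
-- what changed: Replaces A's iterative single-backup backtracking glob loop with a structurally recursive two-position wildcard matcher, and A's append-and-break accumulator loop with a filter over the sorted nicknames using any().
import Mathlib
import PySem

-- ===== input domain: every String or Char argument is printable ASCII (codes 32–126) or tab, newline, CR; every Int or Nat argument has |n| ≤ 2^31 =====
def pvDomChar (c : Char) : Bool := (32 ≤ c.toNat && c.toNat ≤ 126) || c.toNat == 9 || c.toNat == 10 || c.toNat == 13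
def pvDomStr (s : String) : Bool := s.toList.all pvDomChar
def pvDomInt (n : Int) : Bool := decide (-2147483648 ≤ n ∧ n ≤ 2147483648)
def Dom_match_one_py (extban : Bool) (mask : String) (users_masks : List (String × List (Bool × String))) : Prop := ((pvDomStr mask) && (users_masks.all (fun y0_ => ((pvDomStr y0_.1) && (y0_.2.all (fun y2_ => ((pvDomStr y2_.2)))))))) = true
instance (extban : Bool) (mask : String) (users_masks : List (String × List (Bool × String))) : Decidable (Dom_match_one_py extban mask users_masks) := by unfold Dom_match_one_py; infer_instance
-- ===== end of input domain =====

-- B replaces A's iterative single-backup backtracking glob matcher with a structurally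
-- recursive matcher over the two positions, and the append-and-break loop with a filter;
-- same values everywhere ('alternative', not claimed faster).
-- Both matcher ports carry a fuel argument as a totalization guard only; the supplied
-- fuel provably exceeds the number of steps (see the lemmas below), so it never runs out.

-- ===== PORT A =====
-- _glob_match's while loop, state (i, j, i_backup, j_backup)
def globLoopF (p s : List Char) : Nat → Int → Int → Int → Int → Bool
  | 0, _, _, _, _ => false   -- unreachable: fuel dominates the loop's step count
  | fuel+1, i, j, ib, jb =>
    if j < (s.length : Int) then
      -- p = (pattern[i:] or [None])[0]
      let pc : Option Char := (p.drop i.toNat).head?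
      if pc = some '*' then
        globLoopF p s fuel (i+1) j (i+1) j
      else if pc = some '?' ∨ pc = s[j.toNat]? then
        globLoopF p s fuel (i+1) (j+1) ib jb
      else
        if ib = -1 then false
        else globLoopF p s fuel ib (jb+1) ib (jb+1)
    else decide (i = (p.length : Int))

def globMatchA (pattern s : String) : Bool :=
  globLoopF pattern.toList s.toList
    ((s.toList.length + 1) * (s.toList.length + 2) * (pattern.toList.length + 1))
    0 0 (-1) (-1)

-- the inner 'for user_extban, user_mask in user_masks: … break' loop of _match_one
def matchLoopA (extban : Bool) (mask : String) : List (Bool × String) → Bool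
  | [] => false
  | um :: rest =>
      if (!extban || um.1) && globMatchA mask um.2 then true else matchLoopA extban mask rest

def match_one_py (extban : Bool) (mask : String) (users_masks : List (String × List (Bool × String))) : List String :=
  let d : PySem.Dict String (List (Bool × String)) := PySem.Dict.mk users_masks
  (PySem.List.sorted d.keys (fun x => x) false).foldl
    (fun affected nickname =>
      if matchLoopA extban mask ((d.get? nickname).getD []) then affected ++ [nickname]
      else affected) []

-- ===== PORT B =====
theorem pvNotLe {m i : Nat} (h : ¬ m ≤ i) : i < m := Nat.lt_of_not_le h

-- Source B's recursive matcher f(i, j)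
def globRecF (p s : List Char) : Nat → Nat → Nat → Bool
  | 0, _, _ => false   -- unreachable: fuel dominates the recursion depth
  | fuel+1, i, j =>
    if hj : s.length ≤ j then decide (i = p.length)
    else if hi : p.length ≤ i then false
    else
      let c := p[i]'(pvNotLe hi)
      if c = '*' then
        decide (i + 1 = p.length) || globRecF p s fuel (i+1) j || globRecF p s fuel i (j+1)
      else (decide (c = '?') || decide (c = s[j]'(pvNotLe hj))) && globRecF p s fuel (i+1) (j+1)

def globMatchB (pattern s : String) : Bool :=
  globRecF pattern.toList s.toList (pattern.toList.length + s.toList.length + 1) 0 0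

def match_one_py_alt (extban : Bool) (mask : String) (users_masks : List (String × List (Bool × String))) : List String :=
  let d : PySem.Dict String (List (Bool × String)) := PySem.Dict.mk users_masks
  (PySem.List.sorted d.keys (fun x => x) false).filter
    (fun nick => ((d.get? nick).getD []).any
      (fun um => (!extban || um.1) && globMatchB mask um.2))

-- ===== PRECONDITION & SPEC =====
def Spec_match_one_py (extban : Bool) (mask : String) (users_masks : List (String × List (Bool × String))) (out : List String) : Prop := out = match_one_py_alt extban mask users_masks
instance (extban : Bool) (mask : String) (users_masks : List (String × List (Bool × String))) (out : List String) : Decidable (Spec_match_one_py extban mask users_masks out) := by unfold Spec_match_one_py; infer_instance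

-- ===== CLAIM (what is proved, stated in full; the proofs are below) =====
def Claim_equal_match_one_py : Prop := ∀ (extban : Bool) (mask : String) (users_masks : List (String × List (Bool × String))), Dom_match_one_py extban mask users_masks → Spec_match_one_py extban mask users_masks (match_one_py extban mask users_masks)

-- ===== LEMMAS AND PROOFS =====

-- proof-side copy of Source B's matcher without the fuel argument (well-founded recursion);
-- the fueled ports are reduced to it below
def globRecG (p s : List Char) (i j : Nat) : Bool :=
  if hj : s.length ≤ j then decide (i = p.length)
  else if hi : p.length ≤ i then false
  else
    let c := p[i]'(pvNotLe hi)
    if c = '*' then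
      decide (i + 1 = p.length) || globRecG p s (i+1) j || globRecG p s i (j+1)
    else (decide (c = '?') || decide (c = s[j]'(pvNotLe hj))) && globRecG p s (i+1) (j+1)
termination_by (p.length - i) + (s.length - j)
decreasing_by all_goals omega

theorem recF_adequate (p s : List Char) :
    ∀ (fuel i j : Nat), p.length - i + (s.length - j) < fuel →
      globRecF p s fuel i j = globRecG p s i j := by
  intro fuel
  induction fuel with
  | zero => intro i j h; omega
  | succ fuel IH =>
    intro i j h
    show globRecF p s (fuel+1) i j = _
    simp only [globRecF]
    rw [globRecG]
    by_cases hj : s.length ≤ j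
    · rw [dif_pos hj, dif_pos hj]
    · rw [dif_neg hj, dif_neg hj]
      by_cases hi : p.length ≤ i
      · rw [dif_pos hi, dif_pos hi]
      · rw [dif_neg hi, dif_neg hi]
        by_cases hc : p[i]'(pvNotLe hi) = '*'
        · rw [if_pos hc, if_pos hc, IH (i+1) j (by omega), IH i (j+1) (by omega)]
        · rw [if_neg hc, if_neg hc, IH (i+1) (j+1) (by omega)]

theorem pvHeadLt {p : List Char} {i : Int} {c : Char} (h : (p.drop i.toNat).head? = some c) :
    i.toNat < p.length := by
  by_contra hc
  rw [List.drop_eq_nil_of_le (by omega : p.length ≤ i.toNat)] at h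
  simp at h

-- consuming a star-free pattern segment: positions only, pointwise
theorem segLemma (p s : List Char) :
    ∀ (d ib k : Nat), ib + d < p.length →
      (∀ t, t < d → p[ib+t]? ≠ some '*') → globRecG p s ib k = true →
      k + d ≤ s.length ∧ globRecG p s (ib+d) (k+d) = true := by
  intro d
  induction d with
  | zero =>
    intro ib k hlt hsf h
    by_cases hk : s.length ≤ k
    · rw [globRecG] at h
      simp [hk] at h
      omega
    · exact ⟨by omega, h⟩
  | succ d IH =>
    intro ib k hlt hsf h
    by_cases hk : s.length ≤ k
    · rw [globRecG] at h
      simp [hk] at h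
      omega
    · have hib : ib < p.length := by omega
      have hc0 : p[ib]? ≠ some '*' := by
        have := hsf 0 (by omega)
        simpa using this
      have hcb : p[ib]'hib ≠ '*' := by
        intro he
        exact hc0 (by simp [List.getElem?_eq_getElem hib, he])
      rw [globRecG, dif_neg hk, dif_neg (by omega : ¬ p.length ≤ ib)] at h
      simp only [if_neg hcb, Bool.and_eq_true] at h
      have h2 : globRecG p s (ib+1) (k+1) = true := h.2
      have := IH (ib+1) (k+1) (by omega)
        (fun t ht => by
          have := hsf (t+1) (by omega)
          simpa [Nat.add_assoc, Nat.add_comm 1 t] using this) h2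
      refine ⟨by omega, ?_⟩
      have e1 : ib + (d+1) = (ib+1)+d := by omega
      have e2 : k + (d+1) = (k+1)+d := by omega
      rw [e1, e2]
      exact this.2

-- a star position matches from any earlier start
theorem starBack (p s : List Char) (i : Nat) (hp : p[i]? = some '*') :
    ∀ (k j : Nat), j ≤ k → k ≤ s.length → globRecG p s i k = true →
      globRecG p s i j = true := by
  have hi : i < p.length := by
    by_contra hc
    rw [List.getElem?_eq_none (by omega : p.length ≤ i)] at hp
    simp at hp
  have hc : p[i]'hi = '*' := by
    rw [List.getElem?_eq_getElem hi] at hp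
    exact Option.some.inj hp
  have step : ∀ j : Nat, j < s.length → globRecG p s i (j+1) = true →
      globRecG p s i j = true := by
    intro j hjn h
    rw [globRecG, dif_neg (by omega : ¬ s.length ≤ j),
      dif_neg (by omega : ¬ p.length ≤ i), if_pos hc]
    simp [h]
  intro k
  induction k with
  | zero =>
    intro j hjk _ h
    have : j = 0 := by omega
    exact this ▸ h
  | succ k IH =>
    intro j hjk hk h
    rcases Nat.lt_or_ge j (k+1) with hlt | hge
    · have hk2 : globRecG p s i k = true := step k (by omega) h
      exact IH j (by omega) (by omega) hk2
    · have : j = k+1 := by omega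
      exact this ▸ h

-- unfolding a run of star steps forward
theorem starFwd (p s : List Char) (i : Nat) (hp : p[i]? = some '*') :
    ∀ (j : Nat), j < s.length → globRecG p s i j = true →
      ∃ k : Nat, j ≤ k ∧ k ≤ s.length ∧ globRecG p s (i+1) k = true := by
  have hi : i < p.length := by
    by_contra hc
    rw [List.getElem?_eq_none (by omega : p.length ≤ i)] at hp
    simp at hp
  have hc : p[i]'hi = '*' := by
    rw [List.getElem?_eq_getElem hi] at hp
    exact Option.some.inj hp
  suffices H : ∀ (d j : Nat), s.length - j ≤ d → j < s.length → globRecG p s i j = true →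
      ∃ k : Nat, j ≤ k ∧ k ≤ s.length ∧ globRecG p s (i+1) k = true by
    intro j hjn h
    exact H (s.length - j) j le_rfl hjn h
  intro d
  induction d with
  | zero => intro j hd hjn _; omega
  | succ d IH =>
    intro j hd hjn h
    rw [globRecG, dif_neg (by omega : ¬ s.length ≤ j),
      dif_neg (by omega : ¬ p.length ≤ i), if_pos hc] at h
    simp only [Bool.or_eq_true, decide_eq_true_eq] at h
    rcases h with (hend | hnext) | hskip
    · refine ⟨s.length, by omega, le_rfl, ?_⟩
      rw [globRecG, dif_pos (le_rfl : s.length ≤ s.length)]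
      simp [hend]
    · exact ⟨j, le_rfl, by omega, hnext⟩
    · rcases Nat.lt_or_ge (j+1) s.length with h1 | h1
      · obtain ⟨k, hk1, hk2, hk3⟩ := IH (j+1) (by omega) h1 hskip
        exact ⟨k, by omega, hk2, hk3⟩
      · exfalso
        rw [globRecG, dif_pos (by omega : s.length ≤ j+1)] at hskip
        simp only [decide_eq_true_eq] at hskip
        omega

theorem starBwd (p s : List Char) (i : Nat) (hp : p[i]? = some '*')
    (j k : Nat) (hjk : j ≤ k) (hk : k ≤ s.length) (hjn : j < s.length)
    (hm : globRecG p s (i+1) k = true) : globRecG p s i j = true := by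
  have hi : i < p.length := by
    by_contra hc
    rw [List.getElem?_eq_none (by omega : p.length ≤ i)] at hp
    simp at hp
  have hc : p[i]'hi = '*' := by
    rw [List.getElem?_eq_getElem hi] at hp
    exact Option.some.inj hp
  rcases Nat.lt_or_ge k s.length with h1 | h1
  · have hMk : globRecG p s i k = true := by
      rw [globRecG, dif_neg (by omega : ¬ s.length ≤ k),
        dif_neg (by omega : ¬ p.length ≤ i), if_pos hc]
      simp [hm]
    exact starBack p s i hp k j hjk (by omega) hMk
  · have hkn : k = s.length := by omega
    rw [hkn, globRecG, dif_pos le_rfl] at hm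
    simp only [decide_eq_true_eq] at hm
    rw [globRecG, dif_neg (by omega : ¬ s.length ≤ j),
      dif_neg (by omega : ¬ p.length ≤ i), if_pos hc]
    simp [hm]

-- the step count of A's loop, bounded lexicographically
def pvBound (p s : List Char) (i j jb : Int) : Nat :=
  (s.length + 1 - (jb+1).toNat) * ((s.length+1) * (p.length+1))
    + (s.length - j.toNat) * (p.length+1) + (p.length - i.toNat) + 1

theorem pvLexDec {n m A A' B B' C C' : Nat} (hB' : B' ≤ n) (hC' : C' ≤ m)
    (h : A' < A ∨ (A' = A ∧ (B' < B ∨ (B' = B ∧ C' < C)))) :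
    A' * ((n+1)*(m+1)) + B' * (m+1) + C' < A * ((n+1)*(m+1)) + B * (m+1) + C := by
  have hW : B' * (m+1) + C' < (n+1)*(m+1) := by
    have h1 : B' * (m+1) ≤ n * (m+1) := Nat.mul_le_mul_right _ hB'
    have h2 : (n+1)*(m+1) = n*(m+1) + (m+1) := by ring
    omega
  rcases h with h | ⟨hA, h⟩
  · calc A' * ((n+1)*(m+1)) + B' * (m+1) + C'
        < A' * ((n+1)*(m+1)) + (n+1)*(m+1) := by omega
      _ = (A'+1) * ((n+1)*(m+1)) := by ring
      _ ≤ A * ((n+1)*(m+1)) := Nat.mul_le_mul_right _ h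
      _ ≤ A * ((n+1)*(m+1)) + B * (m+1) + C := by omega
  · subst hA
    have hmid : B' * (m+1) + C' < B * (m+1) + C := by
      rcases h with h | ⟨hBe, h⟩
      · calc B' * (m+1) + C' < B' * (m+1) + (m+1) := by omega
          _ = (B'+1)*(m+1) := by ring
          _ ≤ B * (m+1) := Nat.mul_le_mul_right _ h
          _ ≤ B * (m+1) + C := by omega
      · subst hBe; omega
    omega

theorem pvBoundStar {p s : List Char} {i j jb : Int} (hip : i.toNat < p.length)
    (hi : 0 ≤ i) (hj : 0 ≤ j) (hjb : -1 ≤ jb) (hjbj : jb ≤ j) (hlt : j < (s.length : Int)) :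
    pvBound p s (i+1) j j < pvBound p s i j jb := by
  unfold pvBound
  have key := pvLexDec (n := s.length) (m := p.length)
    (A := s.length + 1 - (jb+1).toNat) (A' := s.length + 1 - (j+1).toNat)
    (B := s.length - j.toNat) (B' := s.length - j.toNat)
    (C := p.length - i.toNat) (C' := p.length - (i+1).toNat)
    (by omega) (by omega) (by omega)
  omega

theorem pvBoundMatch {p s : List Char} {i j jb : Int} (hj : 0 ≤ j) (hlt : j < (s.length : Int)) :
    pvBound p s (i+1) (j+1) jb < pvBound p s i j jb := by
  unfold pvBound
  have key := pvLexDec (n := s.length) (m := p.length)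
    (A := s.length + 1 - (jb+1).toNat) (A' := s.length + 1 - (jb+1).toNat)
    (B := s.length - j.toNat) (B' := s.length - (j+1).toNat)
    (C := p.length - i.toNat) (C' := p.length - (i+1).toNat)
    (by omega) (by omega) (by omega)
  omega

theorem pvBoundBack {p s : List Char} {i j ib jb : Int} (hjb : -1 ≤ jb) (hjbj : jb ≤ j)
    (hj : 0 ≤ j) (hlt : j < (s.length : Int)) :
    pvBound p s ib (jb+1) (jb+1) < pvBound p s i j jb := by
  unfold pvBound
  have key := pvLexDec (n := s.length) (m := p.length)
    (A := s.length + 1 - (jb+1).toNat) (A' := s.length + 1 - ((jb+1)+1).toNat)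
    (B := s.length - j.toNat) (B' := s.length - (jb+1).toNat)
    (C := p.length - i.toNat) (C' := p.length - ib.toNat)
    (by omega) (by omega) (by omega)
  omega

theorem pvBoundInit (p s : List Char) :
    pvBound p s 0 0 (-1) ≤ (s.length + 1) * (s.length + 2) * (p.length + 1) := by
  unfold pvBound
  have h0 : (((-1 : Int))+1).toNat = 0 := rfl
  have h1 : ((0 : Int)).toNat = 0 := rfl
  rw [h0, h1, Nat.sub_zero, Nat.sub_zero, Nat.sub_zero]
  exact Nat.le_of_eq (by ring)

-- main loop invariant: from a well-formed state with enough fuel, A's loop returns true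
-- iff the recursive matcher succeeds at the current position, or a retry from the saved
-- backup succeeds
theorem loopIffF (p s : List Char) :
    ∀ (fuel : Nat) (i j ib jb : Int),
      0 ≤ i → 0 ≤ j → -1 ≤ ib → -1 ≤ jb → jb ≤ j →
      i ≤ (p.length : Int) → j ≤ (s.length : Int) →
      (ib = -1 ∨ (0 ≤ ib ∧ ib ≤ i ∧ 0 ≤ jb ∧ i - ib = j - jb ∧
          ∀ t : Nat, ib.toNat ≤ t → t < i.toNat → p[t]? ≠ some '*')) →
      pvBound p s i j jb ≤ fuel →
      (globLoopF p s fuel i j ib jb = true ↔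
        (globRecG p s i.toNat j.toNat = true ∨
         (ib ≠ -1 ∧ ∃ k : Nat, jb < (k : Int) ∧ k ≤ s.length ∧ globRecG p s ib.toNat k = true))) := by
  intro fuel
  induction fuel with
  | zero =>
    intro i j ib jb _ _ _ _ _ _ _ _ hfuel
    exact absurd hfuel (by unfold pvBound; omega)
  | succ fuel IH =>
    intro i j ib jb hi hj hib hjb hjbj hiP hjP hinv hfuel
    show globLoopF p s (fuel+1) i j ib jb = true ↔ _
    simp only [globLoopF]
    by_cases hlt : j < (s.length : Int)
    · rw [if_pos hlt]
      by_cases hstar : (p.drop i.toNat).head? = some '*'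
      · rw [if_pos hstar]
        have hiN : i.toNat < p.length := pvHeadLt hstar
        have hpI : p[i.toNat]? = some '*' := by
          rw [← List.head?_drop]
          exact hstar
        have hIH := IH (i+1) j (i+1) j (by omega) hj (by omega) (by omega) le_rfl
          (by omega) hjP
          (Or.inr ⟨by omega, le_refl _, by omega, by ring, fun t ht1 ht2 => absurd ht2 (by omega)⟩)
          (by have := pvBoundStar hiN hi hj hjb hjbj hlt; omega)
        rw [hIH]
        have e1 : (i+1).toNat = i.toNat + 1 := by omega
        constructor
        · rintro (h | ⟨_, k, hk1, hk2, hk3⟩)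
          · rw [e1] at h
            exact Or.inl (starBwd p s i.toNat hpI j.toNat j.toNat le_rfl (by omega) (by omega) h)
          · rw [e1] at hk3
            exact Or.inl (starBwd p s i.toNat hpI j.toNat k (by omega) hk2 (by omega) hk3)
        · intro hrhs
          have hMij : globRecG p s i.toNat j.toNat = true := by
            rcases hrhs with h | ⟨hbne, k, hk1, hk2, hk3⟩
            · exact h
            · -- old retry is absorbed: it implies a match at the current position
              rcases hinv with hbeq | ⟨hib0, hibi, hjb0, hdiff, hsf⟩
              · exact absurd hbeq hbne
              have hd := segLemma p s (i.toNat - ib.toNat) ib.toNat k (by omega)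
                (fun t ht => hsf (ib.toNat + t) (by omega) (by omega)) hk3
              have e2 : ib.toNat + (i.toNat - ib.toNat) = i.toNat := by omega
              rw [e2] at hd
              exact starBack p s i.toNat hpI (k + (i.toNat - ib.toNat)) j.toNat
                (by omega) hd.1 hd.2
          obtain ⟨k, hk1, hk2, hk3⟩ := starFwd p s i.toNat hpI j.toNat (by omega) hMij
          rcases Nat.eq_or_lt_of_le hk1 with he | hlt2
          · left
            rw [e1, he]
            exact hk3
          · right
            exact ⟨by omega, k, by omega, hk2, by rw [e1]; exact hk3⟩
      · rw [if_neg hstar]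
        by_cases hmatch : (p.drop i.toNat).head? = some '?' ∨ (p.drop i.toNat).head? = s[j.toNat]?
        · rw [if_pos hmatch]
          have hjN : j.toNat < s.length := by omega
          have hsj : s[j.toNat]? = some (s[j.toNat]'hjN) := List.getElem?_eq_getElem hjN
          have hiN : i.toNat < p.length := by
            by_contra hc
            have hnone : (p.drop i.toNat).head? = none := by
              rw [List.drop_eq_nil_of_le (by omega : p.length ≤ i.toNat)]
              rfl
            rcases hmatch with h | h
            · rw [hnone] at h; simp at h
            · rw [hnone, hsj] at h; simp at h
          have hpc : (p.drop i.toNat).head? = some (p[i.toNat]'hiN) := by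
            rw [List.head?_drop, List.getElem?_eq_getElem hiN]
          have hne : ¬ (p[i.toNat]'hiN = '*') := fun he => hstar (by rw [hpc, he])
          have hcond : (decide ((p[i.toNat]'hiN) = '?') ||
              decide ((p[i.toNat]'hiN) = s[j.toNat]'hjN)) = true := by
            rcases hmatch with h | h
            · rw [hpc] at h
              simp [Option.some.inj h]
            · rw [hpc, hsj] at h
              simp [Option.some.inj h]
          have hMeq : globRecG p s i.toNat j.toNat = globRecG p s (i.toNat+1) (j.toNat+1) := by
            rw [globRecG, dif_neg (by omega : ¬ s.length ≤ j.toNat),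
              dif_neg (by omega : ¬ p.length ≤ i.toNat), if_neg hne, hcond, Bool.true_and]
          have hinv' : ib = -1 ∨ (0 ≤ ib ∧ ib ≤ i + 1 ∧ 0 ≤ jb ∧ i + 1 - ib = j + 1 - jb ∧
              ∀ t : Nat, ib.toNat ≤ t → t < (i+1).toNat → p[t]? ≠ some '*') := by
            rcases hinv with hbeq | ⟨hib0, hibi, hjb0, hdiff, hsf⟩
            · exact Or.inl hbeq
            refine Or.inr ⟨hib0, by omega, hjb0, by omega, fun t ht1 ht2 => ?_⟩
            rcases Nat.lt_or_ge t i.toNat with h1 | h1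
            · exact hsf t ht1 h1
            · have : t = i.toNat := by omega
              rw [this, List.getElem?_eq_getElem hiN]
              intro he
              exact hne (Option.some.inj he)
          have hIH := IH (i+1) (j+1) ib jb (by omega) (by omega) hib hjb (by omega)
            (by omega) (by omega) hinv'
            (by have := pvBoundMatch (p := p) (i := i) (jb := jb) hj hlt; omega)
          rw [hIH]
          have e1 : (i+1).toNat = i.toNat + 1 := by omega
          have e2 : (j+1).toNat = j.toNat + 1 := by omega
          rw [hMeq, e1, e2]
        · rw [if_neg hmatch]
          have hMf : globRecG p s i.toNat j.toNat = false := by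
            rw [globRecG, dif_neg (by omega : ¬ s.length ≤ j.toNat)]
            by_cases him : p.length ≤ i.toNat
            · rw [dif_pos him]
            rw [dif_neg him]
            have hpc : (p.drop i.toNat).head? = some (p[i.toNat]'(by omega)) := by
              rw [List.head?_drop, List.getElem?_eq_getElem (by omega : i.toNat < p.length)]
            rw [if_neg (fun he => hstar (by rw [hpc, he]))]
            have h1 : ¬ (p[i.toNat]'(by omega) = '?') :=
              fun he => hmatch (Or.inl (by rw [hpc, he]))
            have h2 : ¬ (p[i.toNat]'(by omega) = s[j.toNat]'(by omega)) := by
              intro he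
              refine hmatch (Or.inr ?_)
              rw [hpc, he, List.getElem?_eq_getElem (by omega : j.toNat < s.length)]
            simp [h1, h2]
          by_cases hb : ib = -1
          · rw [if_pos hb]
            subst hb
            simp [hMf]
          · rw [if_neg hb]
            rcases hinv with hbeq | ⟨hib0, hibi, hjb0, hdiff, hsf⟩
            · exact absurd hbeq hb
            have hIH := IH ib (jb+1) ib (jb+1) (by omega) (by omega) hib (by omega) le_rfl
              (by omega) (by omega)
              (Or.inr ⟨hib0, le_refl _, by omega, by ring, fun t ht1 ht2 => absurd ht2 (by omega)⟩)
              (by have := pvBoundBack (p := p) (i := i) (ib := ib) hjb hjbj hj hlt; omega)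
            rw [hIH, hMf]
            constructor
            · rintro (h | ⟨_, k, hk1, hk2, hk3⟩)
              · refine Or.inr ⟨hb, (jb+1).toNat, by omega, by omega, ?_⟩
                exact h
              · exact Or.inr ⟨hb, k, by omega, hk2, hk3⟩
            · rintro (h | ⟨_, k, hk1, hk2, hk3⟩)
              · simp at h
              · by_cases hke : (k : Int) = jb + 1
                · left
                  have : (jb+1).toNat = k := by omega
                  rw [this]
                  exact hk3
                · exact Or.inr ⟨hb, k, by omega, hk2, hk3⟩
    · rw [if_neg hlt]
      have hjn : j.toNat = s.length := by omega
      have hM : globRecG p s i.toNat j.toNat = decide (i.toNat = p.length) := by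
        rw [globRecG, dif_pos (by omega : s.length ≤ j.toNat)]
      constructor
      · intro h
        left
        rw [hM]
        simp only [decide_eq_true_eq] at h ⊢
        omega
      · rintro (h | ⟨hbne, k, hk1, hk2, hk3⟩)
        · rw [hM] at h
          simp only [decide_eq_true_eq] at h ⊢
          omega
        · rcases hinv with hbeq | ⟨hib0, hibi, hjb0, hdiff, hsf⟩
          · exact absurd hbeq hbne
          by_cases him : i = (p.length : Int)
          · simp [him]
          exfalso
          have hiN : i.toNat < p.length := by omega
          have hd := segLemma p s (i.toNat - ib.toNat) ib.toNat k (by omega)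
            (fun t ht => hsf (ib.toNat + t) (by omega) (by omega)) hk3
          omega

theorem globEq (pattern s : String) : globMatchA pattern s = globMatchB pattern s := by
  have hB : globMatchB pattern s = globRecG pattern.toList s.toList 0 0 := by
    rw [globMatchB]
    exact recF_adequate _ _ _ 0 0 (by omega)
  have h := loopIffF pattern.toList s.toList
    ((s.toList.length + 1) * (s.toList.length + 2) * (pattern.toList.length + 1))
    0 0 (-1) (-1) (by omega) (by omega) (by omega) (by omega) (by omega) (by omega) (by omega)
    (Or.inl rfl) (pvBoundInit pattern.toList s.toList)
  simp only [ne_eq, not_true_eq_false, false_and, or_false, Int.toNat_zero] at h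
  rw [globMatchA, hB]
  rcases hb : globRecG pattern.toList s.toList 0 0 with _ | _
  · rw [hb] at h
    exact Bool.eq_false_iff.mpr (fun hT => by simpa using h.mp hT)
  · exact h.mpr hb

theorem matchLoopA_eq_any (extban : Bool) (mask : String) (l : List (Bool × String)) :
    matchLoopA extban mask l = l.any (fun um => (!extban || um.1) && globMatchB mask um.2) := by
  induction l with
  | nil => rfl
  | cons um rest IH =>
    rw [matchLoopA, List.any_cons, globEq, IH]
    by_cases h : ((!extban || um.1) && globMatchB mask um.2) = true
    · simp [h]
    · simp only [Bool.not_eq_true] at h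
      simp [h]

-- ===== VERDICT (by name: the statement is the Claim_ definition above) =====
theorem match_one_py_spec : Claim_equal_match_one_py := by
  intro extban mask users_masks _
  unfold Spec_match_one_py match_one_py match_one_py_alt
  rw [PySem.List.foldl_append_if_eq_filter, List.nil_append]
  exact List.filter_congr (fun nick _ => by rw [matchLoopA_eq_any])
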